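-- pv_equiv track=rewrite | github.com/tbritte/CU-RocketEngineering-Avionics-software-2022-2023 | flight_controller/flight_control/telemetry_downlink.py | find_sync_bytes
-- ===== SOURCE A (Python) =====
-- def find_sync_bytes(buffer):
--     """
--     Find the second to last 'CRE' in the buffer. Does not use the newest 'CRE' because it may be incomplete
--     :param buffer: List of bytes from the serial port read buffer
--     :return: The index of the second to last 'CRE' in the buffer or -1 if no 'CRE' was found
--     """
--
--     found_newest_cre = False
--     for j in range(len(buffer)):
--         i = len(buffer) - j - 1  # Going backwards through the buffer
--         if i < len(buffer) - 3:
--             if buffer[i] == 67 and buffer[i + 1] == 82 and buffer[i + 2] == 69:  # 'C', 'R', 'E'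
--                 if found_newest_cre:  # If we have already found the newest 'CRE'
--                     return i  # Return the index of the second to last 'CRE'
--                 else:  # This is the newest 'CRE'
--                     found_newest_cre = True
--     return -1  # If we didn't find any 'CRE's
-- ===== SOURCE B (Python) =====
-- def find_sync_bytes(buffer):
--     """Gather-then-select: collect all 'CRE' start indices in one forward pass,
--     then return the second-to-last one (or -1)."""
--     idxs = [i for i in range(len(buffer) - 3)
--             if buffer[i] == 67 and buffer[i + 1] == 82 and buffer[i + 2] == 69]
--     return idxs[-2] if len(idxs) >= 2 else -1
-- ===== Notes on version B (the rewrite author's own statement) =====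
-- stated objective: simpler
-- what changed: Replaces the backward scan with a boolean found-flag and early return by a single forward comprehension pass that gathers every 'CRE' start index and then selects the second-to-last one (keeping the loop bound at len-3, so a match starting at len-3 is excluded exactly as in A).
import Mathlib
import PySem

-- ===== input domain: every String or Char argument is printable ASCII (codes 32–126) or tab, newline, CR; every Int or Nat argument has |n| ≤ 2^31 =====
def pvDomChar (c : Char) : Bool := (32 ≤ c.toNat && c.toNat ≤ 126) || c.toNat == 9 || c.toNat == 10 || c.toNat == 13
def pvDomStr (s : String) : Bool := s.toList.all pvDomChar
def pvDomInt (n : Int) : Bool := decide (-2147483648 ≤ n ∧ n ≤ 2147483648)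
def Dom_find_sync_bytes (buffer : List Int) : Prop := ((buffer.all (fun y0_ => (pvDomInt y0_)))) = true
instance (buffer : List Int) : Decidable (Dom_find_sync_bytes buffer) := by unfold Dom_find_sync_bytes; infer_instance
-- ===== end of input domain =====

-- B replaces A's backward scan with a found-flag by a forward gather-all-matches pass
-- followed by selecting idxs[-2]; objective: simpler (same O(n) cost).

-- ===== PORT A =====
-- the three-byte test 'buffer[i]==67 and buffer[i+1]==82 and buffer[i+2]==69'
-- (both Pythons contain this same expression; indices are always in range where it is evaluated)
def pvCre (buffer : List Int) (i : Int) : Bool :=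
  PySem.List.pyGetD buffer i 0 == 67 && PySem.List.pyGetD buffer (i + 1) 0 == 82
    && PySem.List.pyGetD buffer (i + 2) 0 == 69

-- A's backward loop over j, with the found_newest_cre flag and early return
def pvLoopA (buffer : List Int) (found : Bool) : List Int → Int
  | [] => -1
  | j :: js =>
    let i : Int := (buffer.length : Int) - j - 1
    if i < (buffer.length : Int) - 3 then
      if pvCre buffer i then
        if found then i else pvLoopA buffer true js
      else pvLoopA buffer found js
    else pvLoopA buffer found js

def find_sync_bytes (buffer : List Int) : Int :=
  pvLoopA buffer false (PySem.List.pyRange 0 (buffer.length : Int) 1)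

-- ===== PORT B =====
def find_sync_bytes_alt (buffer : List Int) : Int :=
  let idxs := (PySem.List.pyRange 0 ((buffer.length : Int) - 3) 1).filter (pvCre buffer)
  if 2 ≤ idxs.length then (PySem.List.pyGet? idxs (-2)).getD (-1) else -1

-- ===== PRECONDITION & SPEC =====
def Spec_find_sync_bytes (buffer : List Int) (out : Int) : Prop := out = find_sync_bytes_alt buffer
instance (buffer : List Int) (out : Int) : Decidable (Spec_find_sync_bytes buffer out) := by unfold Spec_find_sync_bytes; infer_instance

-- ===== CLAIM (what is proved, stated in full; the proofs are below) =====
def Claim_equal_find_sync_bytes : Prop := ∀ (buffer : List Int), Dom_find_sync_bytes buffer → Spec_find_sync_bytes buffer (find_sync_bytes buffer)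

-- ===== LEMMAS AND PROOFS =====

-- selection that A's flag machinery performs on the (descending) match list:
-- found = true: head; found = false: second element; else -1
def pvSel : Bool → List Int → Int
  | true, x :: _ => x
  | false, _ :: x :: _ => x
  | _, _ => -1

-- the match produced by iteration j of A's loop, if any
def pvHit (buffer : List Int) (j : Int) : Option Int :=
  let i : Int := (buffer.length : Int) - j - 1
  if i < (buffer.length : Int) - 3 ∧ pvCre buffer i then some i else none

lemma pvSel_false_cons (a : Int) (m : List Int) : pvSel false (a :: m) = pvSel true m := by
  cases m <;> rfl

lemma pvLoopA_eq_sel (buffer : List Int) :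
    ∀ (js : List Int) (found : Bool),
      pvLoopA buffer found js = pvSel found (js.filterMap (pvHit buffer)) := by
  intro js
  induction js with
  | nil => intro found; cases found <;> rfl
  | cons j js ih =>
    intro found
    rw [List.filterMap_cons]
    by_cases h1 : (buffer.length : Int) - j - 1 < (buffer.length : Int) - 3
    · by_cases h2 : pvCre buffer ((buffer.length : Int) - j - 1) = true
      · have hhit : pvHit buffer j = some ((buffer.length : Int) - j - 1) := by
          simp only [pvHit]; rw [if_pos ⟨h1, h2⟩]
        rw [hhit]
        simp only [pvLoopA]
        rw [if_pos h1, if_pos h2]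
        cases found
        · rw [pvSel_false_cons]; exact ih true
        · rfl
      · have hhit : pvHit buffer j = none := by
          simp only [pvHit]; rw [if_neg (by tauto)]
        rw [hhit]
        simp only [pvLoopA]
        rw [if_pos h1, if_neg h2]
        exact ih found
    · have hhit : pvHit buffer j = none := by
        simp only [pvHit]; rw [if_neg (by tauto)]
      rw [hhit]
      simp only [pvLoopA]
      rw [if_neg h1]
      exact ih found

lemma filterMap_hit_all (buffer : List Int) (l : List Int)
    (h : ∀ i ∈ l, i < (buffer.length : Int) - 3) :
    l.filterMap (fun i => if i < (buffer.length : Int) - 3 ∧ pvCre buffer i then some i else none)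
      = l.filter (pvCre buffer) := by
  induction l with
  | nil => rfl
  | cons x l ih =>
    simp only [List.filterMap_cons, List.filter_cons]
    rw [ih (fun i hi => h i (List.mem_cons_of_mem _ hi))]
    have hx := h x (List.mem_cons_self ..)
    by_cases hc : pvCre buffer x = true
    · rw [if_pos ⟨hx, hc⟩, if_pos hc]
    · rw [if_neg (by tauto), if_neg (by simpa using hc)]

lemma filterMap_hit_none (buffer : List Int) (l : List Int)
    (h : ∀ i ∈ l, ¬ i < (buffer.length : Int) - 3) :
    l.filterMap (fun i => if i < (buffer.length : Int) - 3 ∧ pvCre buffer i then some i else none)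
      = [] := by
  rw [List.filterMap_eq_nil_iff]
  intro i hi
  rw [if_neg (by exact fun hh => h i hi hh.1)]

-- A's i-sequence is the reverse of the forward range
lemma map_i_reverse (buffer : List Int) :
    (PySem.List.pyRange 0 (buffer.length : Int) 1).map
        (fun j => (buffer.length : Int) - j - 1)
      = (PySem.List.pyRange 0 (buffer.length : Int) 1).reverse := by
  rw [PySem.List.pyRange_one]
  apply List.ext_getElem
  · simp
  · intro k h1 h2
    simp only [List.getElem_map, List.getElem_reverse, List.getElem_range]
    simp only [List.length_reverse, List.length_map, List.length_range] at h1 h2 ⊢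
    have hk : k < ((buffer.length : Int) - 0).toNat := by omega
    omega

lemma sel_false_reverse (l : List Int) :
    pvSel false l.reverse = if 2 ≤ l.length then (PySem.List.pyGet? l (-2)).getD (-1) else -1 := by
  by_cases h : 2 ≤ l.length
  · rw [if_pos h, PySem.List.pyGet?_neg_ofNat l 2 (by omega) (by omega)]
    have h2 : l.length - 2 < l.length := by omega
    have hrev : l.reverse[1]? = some l[l.length - 2] := by
      rw [List.getElem?_eq_getElem (by rw [List.length_reverse]; omega)]
      rw [List.getElem_reverse]
      congr 1
    match hl : l.reverse, hrev with
    | x :: y :: _, hrev =>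
      simp only [List.getElem?_cons_succ, List.getElem?_cons_zero, Option.some.injEq] at hrev
      simp [pvSel, hrev, List.getElem?_eq_getElem h2]
  · rw [if_neg h]
    have hlen : l.reverse.length < 2 := by rw [List.length_reverse]; omega
    match hl : l.reverse, hlen with
    | [], _ => rfl
    | [x], _ => rfl

-- ===== VERDICT (by name: the statement is the Claim_ definition above) =====
theorem find_sync_bytes_spec : Claim_equal_find_sync_bytes := by
  intro buffer _
  unfold Spec_find_sync_bytes
  show find_sync_bytes buffer = find_sync_bytes_alt buffer
  unfold find_sync_bytes find_sync_bytes_alt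
  rw [pvLoopA_eq_sel]
  have hmap : (PySem.List.pyRange 0 (buffer.length : Int) 1).filterMap (pvHit buffer)
      = ((PySem.List.pyRange 0 (buffer.length : Int) 1).reverse).filterMap
          (fun i => if i < (buffer.length : Int) - 3 ∧ pvCre buffer i then some i else none) := by
    rw [← map_i_reverse, List.filterMap_map]
    rfl
  rw [hmap, List.filterMap_reverse]
  have hsplit : PySem.List.pyRange 0 (buffer.length : Int) 1
      = PySem.List.pyRange 0 (max 0 ((buffer.length : Int) - 3)) 1
        ++ PySem.List.pyRange (max 0 ((buffer.length : Int) - 3)) (buffer.length : Int) 1 := by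
    rw [PySem.List.pyRange_one_append 0 (max 0 ((buffer.length : Int) - 3)) (buffer.length : Int)
      (by omega) (by omega)]
  rw [hsplit, List.filterMap_append]
  rw [filterMap_hit_all buffer _ (fun i hi => by
      have hb := PySem.List.mem_pyRange_one.mp hi; omega)]
  rw [filterMap_hit_none buffer _ (fun i hi => by
      have hb := PySem.List.mem_pyRange_one.mp hi; omega)]
  rw [List.append_nil]
  have hrange : PySem.List.pyRange 0 (max 0 ((buffer.length : Int) - 3)) 1
      = PySem.List.pyRange 0 ((buffer.length : Int) - 3) 1 := by
    by_cases h : 0 ≤ (buffer.length : Int) - 3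
    · rw [max_eq_right h]
    · rw [max_eq_left (by omega), PySem.List.pyRange_one_eq_nil le_rfl,
        PySem.List.pyRange_one_eq_nil (by omega)]
  rw [hrange, sel_false_reverse]
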